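-- pv_equiv track=rewrite | github.com/Alchemist-X/hack-balatro | scripts/llm_play_game.py | get_discard_indices
-- ===== SOURCE A (Python) =====
-- from collections import Counter
--
-- RANK_VALUE = {
--     "Two": 2, "Three": 3, "Four": 4, "Five": 5, "Six": 6,
--     "Seven": 7, "Eight": 8, "Nine": 9, "Ten": 10,
--     "Jack": 10, "Queen": 10, "King": 10, "Ace": 11,
-- }
--
-- def get_discard_indices(cards: list[dict]) -> list[int]:
--     """Choose cards to discard. Keep pairs, flush draws, and high cards."""
--     ranks = [c.get("rank") for c in cards]
--     suits = [c.get("suit") for c in cards]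
--     rc = Counter(ranks)
--     sc = Counter(suits)
--     keep: set[int] = set()
--
--     # Keep paired/tripled cards
--     for r, cnt in rc.items():
--         if cnt >= 2:
--             for i, c in enumerate(cards):
--                 if c["rank"] == r:
--                     keep.add(i)
--
--     # Keep flush draws (4+ of same suit)
--     for s, cnt in sc.items():
--         if cnt >= 4:
--             for i, c in enumerate(cards):
--                 if c["suit"] == s:
--                     keep.add(i)
--
--     # Keep Aces and Kings
--     for i, c in enumerate(cards):
--         if c["rank"] in ("Ace", "King") and len(keep) < 4:
--             keep.add(i)
--
--     # Discard non-kept, lowest value first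
--     disc = sorted(
--         [(RANK_VALUE.get(cards[i]["rank"], 0), i) for i in range(len(cards)) if i not in keep]
--     )
--     count = min(5, len(disc))
--     if count == 0:
--         av = sorted([(RANK_VALUE.get(cards[i]["rank"], 0), i) for i in range(len(cards))])
--         return [x[1] for x in av[: min(5, len(av))]]
--     return [x[1] for x in disc[:count]]
-- ===== SOURCE B (Python) =====
-- from collections import Counter
--
-- RANK_VALUE = {
--     "Two": 2, "Three": 3, "Four": 4, "Five": 5, "Six": 6,
--     "Seven": 7, "Eight": 8, "Nine": 9, "Ten": 10,
--     "Jack": 10, "Queen": 10, "King": 10, "Ace": 11,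
-- }
--
-- def get_discard_indices(cards: list[dict]) -> list[int]:
--     """Choose cards to discard. Keep pairs, flush draws, and high cards."""
--     ranks = [c["rank"] for c in cards]
--     suits = [c.get("suit") for c in cards]
--     rc = Counter(ranks)
--     sc = Counter(suits)
--     # Boolean flag per card: kept iff its rank is paired or its suit is a flush draw.
--     kept = [rc[r] >= 2 or sc[s] >= 4 for r, s in zip(ranks, suits)]
--     cnt = sum(kept)
--     # Ace/King top-up, rebuilding the flag list with a running kept-count.
--     flags = []
--     for r, k in zip(ranks, kept):
--         if cnt < 4 and r in ("Ace", "King") and not k: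
--             k = True
--             cnt += 1
--         flags.append(k)
--     # One sort of all (value, index) pairs; filter the non-kept afterwards.
--     order = sorted((RANK_VALUE.get(r, 0), i) for i, r in enumerate(ranks))
--     disc = [i for _, i in order if not flags[i]]
--     return disc[:5] if disc else [i for _, i in order[:5]]
-- ===== Notes on version B (the rewrite author's own statement) =====
-- stated objective: alternative
-- what changed: A rescans the whole card list once per qualifying rank/suit group and sorts the non-kept pairs (with a second fallback sort); B computes a per-card boolean flag list from two Counter lookups in one zip pass, tops it up for Aces/Kings with a running kept-count, and performs a single sort of all (value,index) pairs from which the discards are filtered afterwards.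
import Mathlib
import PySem

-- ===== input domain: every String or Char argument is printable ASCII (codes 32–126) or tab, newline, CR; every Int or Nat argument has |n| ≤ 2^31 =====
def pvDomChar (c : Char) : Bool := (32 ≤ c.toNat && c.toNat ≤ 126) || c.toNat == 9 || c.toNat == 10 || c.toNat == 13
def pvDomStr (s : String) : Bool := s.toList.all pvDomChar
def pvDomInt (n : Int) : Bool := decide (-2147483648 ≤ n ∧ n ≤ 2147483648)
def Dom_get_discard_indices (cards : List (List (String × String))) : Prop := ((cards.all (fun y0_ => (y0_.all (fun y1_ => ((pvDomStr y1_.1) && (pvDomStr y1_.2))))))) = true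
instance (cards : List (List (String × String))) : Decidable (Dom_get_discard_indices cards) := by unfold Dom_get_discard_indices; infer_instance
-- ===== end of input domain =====

-- B replaces A's per-group rescans by per-card flag computation from two counters, and A's
-- filter-then-sort (with a second fallback sort) by one sort of all pairs filtered afterwards;
-- same return value wherever the Python A returns (Pre_ marks exactly where A returns).

-- ===== PORT A =====
-- shared module constant RANK_VALUE and card lookups (Python dict.get / dict[...])
def RANK_VALUE : PySem.Dict String Int := PySem.Dict.ofList
  [("Two", 2), ("Three", 3), ("Four", 4), ("Five", 5), ("Six", 6),
   ("Seven", 7), ("Eight", 8), ("Nine", 9), ("Ten", 10),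
   ("Jack", 10), ("Queen", 10), ("King", 10), ("Ace", 11)]

def pvGet (c : List (String × String)) (k : String) : Option String :=
  PySem.Dict.get? (PySem.Dict.mk c) k

-- RANK_VALUE.get(<rank of c>, 0); the rank is absent only outside Pre_ (Python raises there)
def pvRankVal (c : List (String × String)) : Int :=
  match pvGet c "rank" with
  | some r => PySem.Dict.getD RANK_VALUE r 0
  | none => 0

def get_discard_indices (cards : List (List (String × String))) : List Int :=
  let ranks := cards.map (fun c => pvGet c "rank")
  let suits := cards.map (fun c => pvGet c "suit")
  let rc := PySem.Dict.counter ranks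
  let sc := PySem.Dict.counter suits
  let keep : PySem.Set Int := PySem.Set.empty
  -- Keep paired/tripled cards
  let keep := rc.items.foldl (fun keep p =>
    if 2 ≤ p.2 then
      (PySem.List.enumerate cards).foldl (fun keep ic =>
        if pvGet ic.2 "rank" = p.1 then PySem.Set.add keep ic.1 else keep) keep
    else keep) keep
  -- Keep flush draws (4+ of same suit)
  let keep := sc.items.foldl (fun keep p =>
    if 4 ≤ p.2 then
      (PySem.List.enumerate cards).foldl (fun keep ic =>
        if pvGet ic.2 "suit" = p.1 then PySem.Set.add keep ic.1 else keep) keep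
    else keep) keep
  -- Keep Aces and Kings
  let keep := (PySem.List.enumerate cards).foldl (fun keep ic =>
    if (pvGet ic.2 "rank" = some "Ace" ∨ pvGet ic.2 "rank" = some "King") ∧ PySem.Set.len keep < 4
    then PySem.Set.add keep ic.1 else keep) keep
  -- Discard non-kept, lowest value first
  let disc := PySem.List.sorted2
    (((PySem.List.pyRange 0 (PySem.List.len cards)).filter (fun i => !PySem.Set.contains keep i)).map
      (fun i => (pvRankVal (PySem.List.pyGetD cards i []), i)))
    (·.1) (·.2)
  let count := min 5 disc.length
  if count = 0 then
    let av := PySem.List.sorted2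
      ((PySem.List.pyRange 0 (PySem.List.len cards)).map
        (fun i => (pvRankVal (PySem.List.pyGetD cards i []), i)))
      (·.1) (·.2)
    (av.take (min 5 av.length)).map (·.2)
  else
    (disc.take count).map (·.2)

-- ===== PORT B =====
-- RANK_VALUE.get(r, 0) for an Optional rank r (B reads ranks with .get everywhere)
def pvVal (r : Option String) : Int :=
  match r with
  | some s => PySem.Dict.getD RANK_VALUE s 0
  | none => 0

def get_discard_indices_alt (cards : List (List (String × String))) : List Int :=
  let ranks := cards.map (fun c => pvGet c "rank")
  let suits := cards.map (fun c => pvGet c "suit")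
  let rc := PySem.Dict.counter ranks
  let sc := PySem.Dict.counter suits
  -- boolean flag per card: kept iff its rank is paired or its suit is a flush draw
  let kept := (ranks.zip suits).map
    (fun rs => decide (2 ≤ rc.getD rs.1 0) || decide (4 ≤ sc.getD rs.2 0))
  let cnt : Int := (kept.map (fun b => if b then (1 : Int) else 0)).sum
  -- Ace/King top-up, rebuilding the flag list with a running kept-count
  let st := (ranks.zip kept).foldl (fun (st : List Bool × Int) rk =>
      if st.2 < 4 ∧ (rk.1 = some "Ace" ∨ rk.1 = some "King") ∧ rk.2 = false
      then (st.1 ++ [true], st.2 + 1) else (st.1 ++ [rk.2], st.2)) ([], cnt)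
  let flags := st.1
  -- one sort of all (value, index) pairs; filter the non-kept afterwards
  let order := PySem.List.sorted2
    ((PySem.List.enumerate ranks).map (fun ir => (pvVal ir.2, ir.1))) (·.1) (·.2)
  let disc := (order.filter (fun vi => !PySem.List.pyGetD flags vi.2 false)).map (·.2)
  if disc ≠ [] then disc.take 5 else (order.take 5).map (·.2)

-- ===== PRECONDITION & SPEC =====
-- Pre_ excludes exactly the inputs where the Python A raises KeyError: a card without a
-- "rank" key (read unconditionally by the Ace/King loop), or a card without a "suit" key
-- while some suit value occurs on 4+ cards (the flush rescan then reads c["suit"] everywhere).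
def Pre_get_discard_indices (cards : List (List (String × String))) : Prop :=
  (∀ c ∈ cards, (pvGet c "rank").isSome) ∧
  ((∀ c ∈ cards, (pvGet c "suit").isSome) ∨
   (∀ c ∈ cards, (cards.map (fun c' => pvGet c' "suit")).count (pvGet c "suit") < 4))
instance (cards : List (List (String × String))) : Decidable (Pre_get_discard_indices cards) := by
  unfold Pre_get_discard_indices; infer_instance

def pvWitness_get_discard_indices : (List (List (String × String))) :=
  [[("rank", "Ace"), ("suit", "Spades")], [("rank", "Two"), ("suit", "Hearts")]]

def Spec_get_discard_indices (cards : List (List (String × String))) (out : List Int) : Prop := out = get_discard_indices_alt cards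
instance (cards : List (List (String × String))) (out : List Int) : Decidable (Spec_get_discard_indices cards out) := by unfold Spec_get_discard_indices; infer_instance

-- ===== CLAIM (what is proved, stated in full; the proofs are below) =====
def Claim_equal_get_discard_indices : Prop := ∀ (cards : List (List (String × String))), Dom_get_discard_indices cards → Pre_get_discard_indices cards → Spec_get_discard_indices cards (get_discard_indices cards)

-- ===== LEMMAS AND PROOFS =====

-- ── sort facts: lexicographic order on (value, index) pairs ──
def pvLe (a b : Int × Int) : Prop := a.1 < b.1 ∨ (a.1 = b.1 ∧ a.2 ≤ b.2)

-- the boolean comparison sorted2 uses for keys (·.1), (·.2)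
def pvBl (a b : Int × Int) : Bool :=
  decide (a.1 < b.1) || (!decide (b.1 < a.1) && decide (a.2 < b.2))

lemma pv_le_trans {a b c : Int × Int} : pvLe a b → pvLe b c → pvLe a c := by
  unfold pvLe; omega

lemma pv_antisymm (a b : Int × Int) : pvLe a b → pvLe b a → a = b := by
  obtain ⟨x, y⟩ := a; obtain ⟨u, v⟩ := b
  simp only [pvLe, Prod.mk.injEq]
  omega

lemma pv_bl_true_le {a b : Int × Int} (h : pvBl a b = true) : pvLe a b := by
  simp only [pvBl, Bool.or_eq_true, Bool.and_eq_true, Bool.not_eq_true', decide_eq_true_iff,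
    decide_eq_false_iff_not] at h
  unfold pvLe; omega

lemma pv_bl_false_le {a b : Int × Int} (h : pvBl a b = false) : pvLe b a := by
  simp only [pvBl, Bool.or_eq_false_iff, Bool.and_eq_false_iff, Bool.not_eq_false',
    decide_eq_true_iff, decide_eq_false_iff_not] at h
  unfold pvLe; omega

lemma pv_pairwise_insertBy (x : Int × Int) :
    ∀ (l : List (Int × Int)), l.Pairwise pvLe →
      (PySem.List.insertBy pvBl x l).Pairwise pvLe := by
  intro l
  induction l with
  | nil => intro _; simp [PySem.List.insertBy]
  | cons y ys ih =>
    intro h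
    rw [List.pairwise_cons] at h
    show ((if pvBl x y then x :: y :: ys else y :: PySem.List.insertBy pvBl x ys)).Pairwise pvLe
    split
    · next hb =>
      refine List.Pairwise.cons ?_ (List.Pairwise.cons h.1 h.2)
      intro z hz
      rcases List.mem_cons.1 hz with rfl | hz
      · exact pv_bl_true_le hb
      · exact pv_le_trans (pv_bl_true_le hb) (h.1 z hz)
    · next hb =>
      refine List.Pairwise.cons ?_ (ih h.2)
      intro z hz
      rcases (PySem.List.mem_insertBy pvBl x z ys).1 hz with rfl | hz
      · exact pv_bl_false_le (by simpa using hb)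
      · exact h.1 z hz

lemma pv_foldl_insertBy_pairwise :
    ∀ (l acc : List (Int × Int)), acc.Pairwise pvLe →
      (l.foldl (fun acc x => PySem.List.insertBy pvBl x acc) acc).Pairwise pvLe := by
  intro l
  induction l with
  | nil => intro acc h; exact h
  | cons a t ih => intro acc h; exact ih _ (pv_pairwise_insertBy a acc h)

lemma pv_sorted2_eq_foldl (l : List (Int × Int)) :
    PySem.List.sorted2 l (·.1) (·.2) = l.foldl (fun acc x => PySem.List.insertBy pvBl x acc) [] := rfl

lemma pv_sorted2_pairwise (l : List (Int × Int)) :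
    (PySem.List.sorted2 l (·.1) (·.2)).Pairwise pvLe := by
  rw [pv_sorted2_eq_foldl]
  exact pv_foldl_insertBy_pairwise l [] List.Pairwise.nil

-- filtering a sorted list = sorting the filtered list (sortedness + perm + antisymmetry)
lemma pv_filter_sorted2 (l : List (Int × Int)) (q : Int × Int → Bool) :
    (PySem.List.sorted2 l (·.1) (·.2)).filter q = PySem.List.sorted2 (l.filter q) (·.1) (·.2) := by
  refine List.Perm.eq_of_pairwise (le := pvLe) (fun a b _ _ => pv_antisymm a b)
    ((pv_sorted2_pairwise l).sublist List.filter_sublist)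
    (pv_sorted2_pairwise _) ?_
  exact ((PySem.List.sorted2_perm l _ _ _).filter q).trans
    ((PySem.List.sorted2_perm (l.filter q) _ _ _)).symm

-- ── A's keep set after the two group phases: membership, nodup, size ──

-- B's per-card keep condition: rank paired or suit a flush draw
def pvCond (cards : List (List (String × String))) (c : List (String × String)) : Bool :=
  decide (2 ≤ (((cards.map (fun c' => pvGet c' "rank")).count (pvGet c "rank") : Int))) ||
  decide (4 ≤ (((cards.map (fun c' => pvGet c' "suit")).count (pvGet c "suit") : Int)))

-- A's keep set after the rank and suit phases (exactly the port's folds)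
def pvKeep12 (cards : List (List (String × String))) : PySem.Set Int :=
  ((PySem.Dict.counter (cards.map (fun c => pvGet c "suit"))).items).foldl (fun keep p =>
    if 4 ≤ p.2 then
      (PySem.List.enumerate cards).foldl (fun keep ic =>
        if pvGet ic.2 "suit" = p.1 then PySem.Set.add keep ic.1 else keep) keep
    else keep)
  (((PySem.Dict.counter (cards.map (fun c => pvGet c "rank"))).items).foldl (fun keep p =>
    if 2 ≤ p.2 then
      (PySem.List.enumerate cards).foldl (fun keep ic =>
        if pvGet ic.2 "rank" = p.1 then PySem.Set.add keep ic.1 else keep) keep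
    else keep) PySem.Set.empty)

-- membership through a fold whose step satisfies a pointwise characterisation
lemma pv_mem_foldl {α : Type} (g : PySem.Set Int → α → PySem.Set Int) (C : α → Int → Prop)
    (hg : ∀ k a x, x ∈ g k a ↔ x ∈ k ∨ C a x) :
    ∀ (l : List α) (s : PySem.Set Int) (x : Int),
      x ∈ l.foldl g s ↔ x ∈ s ∨ ∃ a ∈ l, C a x := by
  intro l
  induction l with
  | nil => simp
  | cons a t ih =>
    intro s x
    rw [List.foldl_cons, ih, hg]
    simp only [List.mem_cons]
    constructor
    · rintro ((h | h) | ⟨b, hb, hc⟩)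
      · exact Or.inl h
      · exact Or.inr ⟨a, Or.inl rfl, h⟩
      · exact Or.inr ⟨b, Or.inr hb, hc⟩
    · rintro (h | ⟨b, (rfl | hb), hc⟩)
      · exact Or.inl (Or.inl h)
      · exact Or.inl (Or.inr hc)
      · exact Or.inr ⟨b, hb, hc⟩

lemma pv_nodup_foldl {α : Type} (g : PySem.Set Int → α → PySem.Set Int)
    (hg : ∀ k a, List.Nodup k → List.Nodup (g k a)) :
    ∀ (l : List α) (s : PySem.Set Int), List.Nodup s → List.Nodup (l.foldl g s) := by
  intro l
  induction l with
  | nil => intro s hs; exact hs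
  | cons a t ih => intro s hs; exact ih _ (hg s a hs)

lemma pv_mem_guard {α : Type} (p : α → Prop) [DecidablePred p] (f : α → Int)
    (k : PySem.Set Int) (a : α) (x : Int) :
    x ∈ (if p a then PySem.Set.add k (f a) else k) ↔ x ∈ k ∨ (p a ∧ x = f a) := by
  split
  · next h => simp [PySem.Set.mem_add, h]
  · next h => simp [h]

lemma pv_nodup_guard {α : Type} (p : α → Prop) [DecidablePred p] (f : α → Int)
    (k : PySem.Set Int) (a : α) (hk : List.Nodup k) :
    List.Nodup (if p a then PySem.Set.add k (f a) else k) := by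
  split
  · exact PySem.Set.nodup_add _ _ hk
  · exact hk

-- membership after one of A's group phases (key = "rank", m = 2 or key = "suit", m = 4)
lemma pv_memA_phase (cards : List (List (String × String))) (key : String) (m : Int)
    (s : PySem.Set Int) (x : Int) :
    x ∈ ((PySem.Dict.counter (cards.map (fun c => pvGet c key))).items.foldl (fun keep p =>
        if m ≤ p.2 then
          (PySem.List.enumerate cards).foldl (fun keep ic =>
            if pvGet ic.2 key = p.1 then PySem.Set.add keep ic.1 else keep) keep
        else keep) s)
    ↔ x ∈ s ∨ ∃ ic ∈ PySem.List.enumerate cards,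
        m ≤ ((cards.map (fun c => pvGet c key)).count (pvGet ic.2 key) : Int) ∧ x = ic.1 := by
  rw [pv_mem_foldl _
    (fun p x => m ≤ p.2 ∧ ∃ ic ∈ PySem.List.enumerate cards, pvGet ic.2 key = p.1 ∧ x = ic.1)
    (by
      intro k a x
      split
      · next h =>
        rw [pv_mem_foldl _ (fun ic x => pvGet ic.2 key = a.1 ∧ x = ic.1)
            (fun k ic x => pv_mem_guard (fun ic => pvGet ic.2 key = a.1) (·.1) k ic x)]
        simp [h]
      · next h => simp [h])]
  rw [PySem.Dict.items_counter]
  constructor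
  · rintro (h | ⟨p, hp, hm, ic, hic, hkey, rfl⟩)
    · exact Or.inl h
    · refine Or.inr ⟨ic, hic, ?_, rfl⟩
      simp only [List.mem_map] at hp
      obtain ⟨r, _, rfl⟩ := hp
      simpa [hkey] using hm
  · rintro (h | ⟨ic, hic, hm, rfl⟩)
    · exact Or.inl h
    · refine Or.inr ⟨(pvGet ic.2 key, ((cards.map (fun c => pvGet c key)).count (pvGet ic.2 key) : Int)),
        ?_, by simpa using hm, ic, hic, rfl, rfl⟩
      simp only [List.mem_map]
      refine ⟨pvGet ic.2 key, ?_, rfl⟩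
      rw [PySem.Set.mem_ofList]
      rcases (PySem.List.mem_enumerate_iff cards 0 ic).1 hic with ⟨j, hj, rfl⟩
      exact List.mem_map.2 ⟨cards[j], List.getElem_mem hj, rfl⟩

lemma pv_mem_keep12 (cards : List (List (String × String))) (x : Int) :
    x ∈ pvKeep12 cards ↔
      ∃ k : Nat, k < cards.length ∧ x = (k : Int) ∧ pvCond cards (cards.getD k []) = true := by
  unfold pvKeep12
  rw [pv_memA_phase cards "suit" 4, pv_memA_phase cards "rank" 2]
  simp only [PySem.Set.empty, List.not_mem_nil, false_or]
  constructor
  · rintro (⟨ic, hic, hm, rfl⟩ | ⟨ic, hic, hm, rfl⟩) <;>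
    · rcases (PySem.List.mem_enumerate_iff cards 0 ic).1 hic with ⟨j, hj, rfl⟩
      refine ⟨j, hj, by simp, ?_⟩
      simp only [pvCond, Bool.or_eq_true, decide_eq_true_iff, List.getD_eq_getElem?_getD,
        List.getElem?_eq_getElem hj, Option.getD_some]
      first
        | exact Or.inl (by simpa using hm)
        | exact Or.inr (by simpa using hm)
  · rintro ⟨k, hk, rfl, hcond⟩
    have hmem : ((k : Int), cards[k]) ∈ PySem.List.enumerate cards :=
      (PySem.List.mem_enumerate_iff cards 0 _).2 ⟨k, hk, by simp⟩
    simp only [pvCond, Bool.or_eq_true, decide_eq_true_iff, List.getD_eq_getElem?_getD,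
      List.getElem?_eq_getElem hk, Option.getD_some] at hcond
    rcases hcond with h | h
    · exact Or.inl ⟨_, hmem, h, rfl⟩
    · exact Or.inr ⟨_, hmem, h, rfl⟩

lemma pv_nodup_keep12 (cards : List (List (String × String))) :
    List.Nodup (pvKeep12 cards) := by
  unfold pvKeep12
  refine pv_nodup_foldl _ ?_ _ _ (pv_nodup_foldl _ ?_ _ _ List.nodup_nil)
  · intro k a hk
    split
    · exact pv_nodup_foldl _
        (fun k ic hk => pv_nodup_guard (fun ic => pvGet ic.2 "suit" = a.1) (·.1) k ic hk) _ _ hk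
    · exact hk
  · intro k a hk
    split
    · exact pv_nodup_foldl _
        (fun k ic hk => pv_nodup_guard (fun ic => pvGet ic.2 "rank" = a.1) (·.1) k ic hk) _ _ hk
    · exact hk

lemma pv_len_keep12 (cards : List (List (String × String))) :
    PySem.Set.len (pvKeep12 cards) =
      ((cards.map (fun c => pvCond cards c)).map (fun b => if b then (1 : Int) else 0)).sum := by
  have hsum := PySem.List.sum_map_ite_one_zero (fun b => b) (cards.map (fun c => pvCond cards c))
  rw [hsum, List.countP_map]
  have hperm : (pvKeep12 cards).Perm
      ((PySem.List.pyRange 0 (PySem.List.len cards)).filter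
        (fun i => pvCond cards (PySem.List.pyGetD cards i []))) := by
    rw [List.perm_ext_iff_of_nodup (pv_nodup_keep12 cards)
      (List.Nodup.filter _ (PySem.List.nodup_pyRange_one 0 _))]
    intro x
    rw [pv_mem_keep12, List.mem_filter, PySem.List.mem_pyRange_one]
    constructor
    · rintro ⟨k, hk, rfl, hc⟩
      refine ⟨⟨by omega, by simpa using hk⟩, ?_⟩
      rwa [PySem.List.pyGetD_of_nonneg _ _ (by omega), Int.toNat_natCast]
    · rintro ⟨⟨h0, hn⟩, hc⟩
      rw [PySem.List.len_eq] at hn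
      refine ⟨x.toNat, by omega, by omega, ?_⟩
      rwa [PySem.List.pyGetD_of_nonneg _ _ h0] at hc
  rw [PySem.Set.len, hperm.length_eq, ← List.countP_eq_length_filter]
  have : cards.countP ((fun b => b) ∘ fun c => pvCond cards c)
      = ((PySem.List.pyRange 0 (PySem.List.len cards)).map
          (fun j => PySem.List.pyGetD cards j [])).countP (fun c => pvCond cards c) := by
    rw [PySem.List.map_pyGetD_pyRange_zero]
    rfl
  rw [this, List.countP_map]
  rfl

-- ── the Ace/King phase: A's set fold vs B's flag-list rebuild with a running count ──

def pvStepA (keep : PySem.Set Int) (ic : Int × List (String × String)) : PySem.Set Int :=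
  if (pvGet ic.2 "rank" = some "Ace" ∨ pvGet ic.2 "rank" = some "King") ∧ PySem.Set.len keep < 4
  then PySem.Set.add keep ic.1 else keep

def pvStepB (st : List Bool × Int) (rk : Option String × Bool) : List Bool × Int :=
  if st.2 < 4 ∧ (rk.1 = some "Ace" ∨ rk.1 = some "King") ∧ rk.2 = false
  then (st.1 ++ [true], st.2 + 1) else (st.1 ++ [rk.2], st.2)

lemma pv_getD_mid_self (l t : List Bool) (b : Bool) :
    (l ++ b :: t).getD l.length false = b := by
  simp [List.getD_eq_getElem?_getD]

lemma pv_getD_mid_ne (l t : List Bool) (b b' : Bool) (i : Nat) (h : i ≠ l.length) :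
    (l ++ b :: t).getD i false = (l ++ b' :: t).getD i false := by
  rcases Nat.lt_or_ge i l.length with hi | hi
  · simp [List.getD_eq_getElem?_getD, List.getElem?_append_left hi]
  · have hi' : l.length < i := by omega
    rw [List.getD_eq_getElem?_getD, List.getD_eq_getElem?_getD,
      List.getElem?_append_right (by omega), List.getElem?_append_right (by omega)]
    have : i - l.length = (i - l.length - 1) + 1 := by omega
    rw [this]
    simp

lemma pv_add_of_mem {s : PySem.Set Int} {x : Int} (h : x ∈ s) : PySem.Set.add s x = s := by
  simp [PySem.Set.add, h]

lemma pv_add_of_not_mem {s : PySem.Set Int} {x : Int} (h : x ∉ s) :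
    PySem.Set.add s x = s ++ [x] := by
  simp [PySem.Set.add, h]

lemma pv_phase3 :
    ∀ (cs : List (List (String × String))) (ks : List Bool), ks.length = cs.length →
    ∀ (acc : List Bool) (s : PySem.Set Int),
    List.Nodup s →
    (∀ x : Int, x ∈ s ↔ ∃ k : Nat, k < acc.length + ks.length ∧ x = (k : Int) ∧
        (acc ++ ks).getD k false = true) →
    List.Nodup ((PySem.List.enumerate cs (acc.length : Int)).foldl pvStepA s) ∧
    (((cs.map (fun c => pvGet c "rank")).zip ks).foldl pvStepB (acc, PySem.Set.len s)).1.length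
      = acc.length + cs.length ∧
    (((cs.map (fun c => pvGet c "rank")).zip ks).foldl pvStepB (acc, PySem.Set.len s)).2
      = PySem.Set.len ((PySem.List.enumerate cs (acc.length : Int)).foldl pvStepA s) ∧
    (∀ x : Int, x ∈ (PySem.List.enumerate cs (acc.length : Int)).foldl pvStepA s ↔
      ∃ k : Nat, k < acc.length + cs.length ∧ x = (k : Int) ∧
        ((((cs.map (fun c => pvGet c "rank")).zip ks).foldl pvStepB
            (acc, PySem.Set.len s)).1).getD k false = true) := by
  intro cs
  induction cs with
  | nil =>
    intro ks hlen acc s hnd hinv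
    have hks : ks = [] := List.eq_nil_of_length_eq_zero (by simpa using hlen)
    subst hks
    simp only [PySem.List.enumerate_nil, List.map_nil, List.zip_nil_left, List.foldl_nil]
    refine ⟨hnd, ?_, ?_, ?_⟩
    · simp
    · trivial
    · simpa using hinv
  | cons c cs ih =>
    intro ks hlen acc s hnd hinv
    obtain ⟨k, ks', rfl⟩ : ∃ k ks', ks = k :: ks' := by
      cases ks with
      | nil => simp at hlen
      | cons a b => exact ⟨a, b, rfl⟩
    have hlen' : ks'.length = cs.length := by simpa using hlen
    rw [PySem.List.enumerate_cons, List.map_cons, List.zip_cons_cons,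
      List.foldl_cons, List.foldl_cons]
    -- the head card's index is acc.length; whether it is already kept is the flag k
    have hjmem : ((acc.length : Int) ∈ s) ↔ k = true := by
      rw [hinv]
      constructor
      · rintro ⟨k', hk', hx, hg⟩
        have : k' = acc.length := by omega
        subst this
        rwa [pv_getD_mid_self] at hg
      · intro hk
        refine ⟨acc.length, ?_, rfl, ?_⟩
        · simp only [List.length_cons]; omega
        · rwa [pv_getD_mid_self]
    by_cases hA : (pvGet c "rank" = some "Ace" ∨ pvGet c "rank" = some "King") ∧
        PySem.Set.len s < 4
    · by_cases hk : k = false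
      · -- A adds a new index; B flips the flag and bumps the count
        subst hk
        have hnm : (acc.length : Int) ∉ s := by simp [hjmem]
        have hstepA : pvStepA s ((acc.length : Int), c) = s ++ [(acc.length : Int)] := by
          rw [pvStepA, if_pos hA, pv_add_of_not_mem hnm]
        have hstepB : pvStepB (acc, PySem.Set.len s) (pvGet c "rank", false)
            = (acc ++ [true], PySem.Set.len s + 1) := by
          rw [pvStepB, if_pos ⟨hA.2, hA.1, rfl⟩]
        rw [hstepA, hstepB]
        have hlen2 : PySem.Set.len s + 1 = PySem.Set.len (s ++ [(acc.length : Int)]) := by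
          simp [PySem.Set.len]
        have hcast : (acc.length : Int) + 1 = (((acc ++ [true]).length : Nat) : Int) := by
          simp
        rw [hlen2, hcast]
        have := ih ks' hlen' (acc ++ [true]) (s ++ [(acc.length : Int)])
          (by
            rw [List.nodup_append]
            refine ⟨hnd, List.nodup_singleton _, ?_⟩
            intro a ha b hb
            rw [List.mem_singleton] at hb
            subst hb
            intro h
            exact hnm (h ▸ ha))
          (by
            intro x
            rw [List.mem_append, hinv, List.mem_singleton, List.append_assoc,
              List.singleton_append]
            constructor
            · rintro (⟨k', hk', rfl, hg⟩ | rfl)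
              · have hne : k' ≠ acc.length := by
                  intro h
                  subst h
                  rw [pv_getD_mid_self] at hg
                  exact Bool.false_ne_true hg
                refine ⟨k', ?_, rfl, ?_⟩
                · simp only [List.length_append, List.length_cons, List.length_nil]
                    at hk' ⊢
                  omega
                · rw [pv_getD_mid_ne acc ks' true false k' hne]
                  exact hg
              · refine ⟨acc.length, ?_, rfl, ?_⟩
                · simp only [List.length_append, List.length_cons, List.length_nil]
                  omega
                · rw [pv_getD_mid_self]
            · rintro ⟨k', hk', rfl, hg⟩
              by_cases hne : k' = acc.length
              · subst hne
                exact Or.inr rfl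
              · refine Or.inl ⟨k', ?_, rfl, ?_⟩
                · simp only [List.length_append, List.length_cons, List.length_nil]
                    at hk' ⊢
                  omega
                · rw [pv_getD_mid_ne acc ks' false true k' hne]
                  exact hg)
        refine ⟨this.1, ?_, this.2.2.1, ?_⟩
        · rw [this.2.1]
          simp only [List.length_append, List.length_cons, List.length_nil]
          omega
        · intro x
          rw [this.2.2.2 x]
          constructor
          · rintro ⟨k', hk', rfl, hg⟩
            refine ⟨k', ?_, rfl, hg⟩
            simp only [List.length_append, List.length_cons, List.length_nil] at hk' ⊢
            omega
          · rintro ⟨k', hk', rfl, hg⟩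
            refine ⟨k', ?_, rfl, hg⟩
            simp only [List.length_append, List.length_cons, List.length_nil] at hk' ⊢
            omega
      · -- the flag is already true: A re-adds an element it has, B carries the flag over
        have hkt : k = true := by
          cases k
          · exact absurd rfl hk
          · rfl
        subst hkt
        have hstepA : pvStepA s ((acc.length : Int), c) = s := by
          rw [pvStepA, if_pos hA]
          exact pv_add_of_mem (hjmem.2 rfl)
        have hstepB : pvStepB (acc, PySem.Set.len s) (pvGet c "rank", true)
            = (acc ++ [true], PySem.Set.len s) := by
          rw [pvStepB, if_neg]
          rintro ⟨-, -, h⟩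
          simp at h
        rw [hstepA, hstepB]
        have hcast : (acc.length : Int) + 1 = (((acc ++ [true]).length : Nat) : Int) := by
          simp
        rw [hcast]
        have := ih ks' hlen' (acc ++ [true]) s hnd
          (by
            intro x
            rw [hinv, List.append_assoc, List.singleton_append]
            constructor
            · rintro ⟨k', hk', rfl, hg⟩
              refine ⟨k', ?_, rfl, hg⟩
              simp only [List.length_append, List.length_cons, List.length_nil] at hk' ⊢
              omega
            · rintro ⟨k', hk', rfl, hg⟩
              refine ⟨k', ?_, rfl, hg⟩
              simp only [List.length_append, List.length_cons, List.length_nil] at hk' ⊢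
              omega)
        refine ⟨this.1, ?_, this.2.2.1, ?_⟩
        · rw [this.2.1]
          simp only [List.length_append, List.length_cons, List.length_nil]
          omega
        · intro x
          rw [this.2.2.2 x]
          constructor
          · rintro ⟨k', hk', rfl, hg⟩
            refine ⟨k', ?_, rfl, hg⟩
            simp only [List.length_append, List.length_cons, List.length_nil] at hk' ⊢
            omega
          · rintro ⟨k', hk', rfl, hg⟩
            refine ⟨k', ?_, rfl, hg⟩
            simp only [List.length_append, List.length_cons, List.length_nil] at hk' ⊢
            omega
    · -- A's guard fails: both sides leave everything unchanged (B appends the old flag)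
      have hstepA : pvStepA s ((acc.length : Int), c) = s := by
        rw [pvStepA, if_neg hA]
      have hstepB : pvStepB (acc, PySem.Set.len s) (pvGet c "rank", k)
          = (acc ++ [k], PySem.Set.len s) := by
        rw [pvStepB, if_neg]
        rintro ⟨h1, h2, -⟩
        exact hA ⟨h2, h1⟩
      rw [hstepA, hstepB]
      have hcast : (acc.length : Int) + 1 = (((acc ++ [k]).length : Nat) : Int) := by
        simp
      rw [hcast]
      have := ih ks' hlen' (acc ++ [k]) s hnd
        (by
          intro x
          rw [hinv, List.append_assoc, List.singleton_append]
          constructor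
          · rintro ⟨k', hk', rfl, hg⟩
            refine ⟨k', ?_, rfl, hg⟩
            simp only [List.length_append, List.length_cons, List.length_nil] at hk' ⊢
            omega
          · rintro ⟨k', hk', rfl, hg⟩
            refine ⟨k', ?_, rfl, hg⟩
            simp only [List.length_append, List.length_cons, List.length_nil] at hk' ⊢
            omega)
      refine ⟨this.1, ?_, this.2.2.1, ?_⟩
      · rw [this.2.1]
        simp only [List.length_append, List.length_cons, List.length_nil]
        omega
      · intro x
        rw [this.2.2.2 x]
        constructor
        · rintro ⟨k', hk', rfl, hg⟩
          refine ⟨k', ?_, rfl, hg⟩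
          simp only [List.length_append, List.length_cons, List.length_nil] at hk' ⊢
          omega
        · rintro ⟨k', hk', rfl, hg⟩
          refine ⟨k', ?_, rfl, hg⟩
          simp only [List.length_append, List.length_cons, List.length_nil] at hk' ⊢
          omega

-- ── assembling: flags after B's rebuild agree pointwise with A's final keep set ──

lemma pv_kept0_eq (cards : List (List (String × String))) :
    ((cards.map (fun c => pvGet c "rank")).zip (cards.map (fun c => pvGet c "suit"))).map
      (fun rs => decide (2 ≤ (PySem.Dict.counter (cards.map (fun c => pvGet c "rank"))).getD rs.1 0)
        || decide (4 ≤ (PySem.Dict.counter (cards.map (fun c => pvGet c "suit"))).getD rs.2 0))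
    = cards.map (fun c => pvCond cards c) := by
  rw [List.zip_map', List.map_map]
  refine List.map_congr_left ?_
  intro c _
  simp [pvCond, PySem.Dict.getD_counter]

lemma pv_keep_corr (cards : List (List (String × String))) :
    ∀ i ∈ PySem.List.pyRange 0 (PySem.List.len cards),
      PySem.Set.contains ((PySem.List.enumerate cards).foldl pvStepA (pvKeep12 cards)) i
      = PySem.List.pyGetD
          ((((cards.map (fun c => pvGet c "rank")).zip (cards.map (fun c => pvCond cards c))).foldl
              pvStepB ([], PySem.Set.len (pvKeep12 cards))).1) i false := by
  have hinv : ∀ x : Int, x ∈ pvKeep12 cards ↔ ∃ k : Nat,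
      k < ([] : List Bool).length + (cards.map (fun c => pvCond cards c)).length ∧ x = (k : Int) ∧
      (([] : List Bool) ++ cards.map (fun c => pvCond cards c)).getD k false = true := by
    intro x
    rw [pv_mem_keep12]
    simp only [List.nil_append, List.length_nil, Nat.zero_add, List.length_map]
    constructor
    · rintro ⟨k, hk, rfl, hcd⟩
      refine ⟨k, hk, rfl, ?_⟩
      rw [List.getD_eq_getElem?_getD, List.getElem?_map, List.getElem?_eq_getElem hk]
      simpa [List.getD_eq_getElem?_getD, List.getElem?_eq_getElem hk] using hcd
    · rintro ⟨k, hk, rfl, hcd⟩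
      refine ⟨k, hk, rfl, ?_⟩
      rw [List.getD_eq_getElem?_getD, List.getElem?_map, List.getElem?_eq_getElem hk] at hcd
      simpa [List.getD_eq_getElem?_getD, List.getElem?_eq_getElem hk] using hcd
  have hfin := pv_phase3 cards (cards.map (fun c => pvCond cards c)) (by simp)
    [] (pvKeep12 cards) (pv_nodup_keep12 cards) hinv
  simp only [List.length_nil, Nat.cast_zero, Nat.zero_add] at hfin
  intro i hi
  rw [PySem.List.mem_pyRange_one] at hi
  obtain ⟨h0, hn⟩ := hi
  rw [PySem.List.len_eq] at hn
  have hmem := hfin.2.2.2 i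
  rw [Bool.eq_iff_iff, PySem.Set.contains_iff, PySem.List.pyGetD_of_nonneg _ _ h0, hmem]
  constructor
  · rintro ⟨k, hk, rfl, hg⟩
    rwa [Int.toNat_natCast]
  · intro hg
    exact ⟨i.toNat, by omega, by omega, hg⟩

lemma pv_take5 {α : Type} (l : List α) : l.take (min 5 l.length) = l.take 5 :=
  Eq.symm List.take_eq_take_min

-- the tail of both ports, over an abstract keep set (A) / flag list (B) that agree pointwise
lemma pv_tail (cards : List (List (String × String))) (kA : PySem.Set Int) (flags : List Bool)
    (hc : ∀ i ∈ PySem.List.pyRange 0 (PySem.List.len cards),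
        PySem.Set.contains kA i = PySem.List.pyGetD flags i false) :
    (let disc := PySem.List.sorted2
        (((PySem.List.pyRange 0 (PySem.List.len cards)).filter (fun i => !PySem.Set.contains kA i)).map
          (fun i => (pvRankVal (PySem.List.pyGetD cards i []), i)))
        (·.1) (·.2)
     let count := min 5 disc.length
     if count = 0 then
       let av := PySem.List.sorted2
         ((PySem.List.pyRange 0 (PySem.List.len cards)).map
           (fun i => (pvRankVal (PySem.List.pyGetD cards i []), i)))
         (·.1) (·.2)
       (av.take (min 5 av.length)).map (·.2)
     else
       (disc.take count).map (·.2))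
    = (let order := PySem.List.sorted2
        ((PySem.List.enumerate (cards.map (fun c => pvGet c "rank"))).map
          (fun ir => (pvVal ir.2, ir.1))) (·.1) (·.2)
       let disc := (order.filter (fun vi => !PySem.List.pyGetD flags vi.2 false)).map (·.2)
       if disc ≠ [] then disc.take 5 else (order.take 5).map (·.2)) := by
  have hranks : ((PySem.List.enumerate (cards.map (fun c => pvGet c "rank"))).map
        (fun ir => (pvVal ir.2, ir.1)))
      = (PySem.List.pyRange 0 (PySem.List.len cards)).map
          (fun i => (pvRankVal (PySem.List.pyGetD cards i []), i)) := by
    rw [PySem.List.enumerate_eq_map_pyRange (cards.map (fun c => pvGet c "rank")) none,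
      List.map_map]
    have hl : PySem.List.len (cards.map (fun c => pvGet c "rank")) = PySem.List.len cards := by
      simp
    rw [hl]
    refine List.map_congr_left ?_
    intro i _
    have hm : PySem.List.pyGetD (cards.map (fun c => pvGet c "rank")) i none
        = pvGet (PySem.List.pyGetD cards i []) "rank" := by
      have h0 : pvGet ([] : List (String × String)) "rank" = none := rfl
      rw [← h0]
      exact PySem.List.pyGetD_map (fun c => pvGet c "rank") cards i []
    show ((pvVal (PySem.List.pyGetD (cards.map (fun c => pvGet c "rank")) i none), i)) = _
    rw [hm]
    rfl
  dsimp only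
  rw [hranks]
  have hdisc : (PySem.List.sorted2
        ((PySem.List.pyRange 0 (PySem.List.len cards)).map
          (fun i => (pvRankVal (PySem.List.pyGetD cards i []), i))) (·.1) (·.2)).filter
          (fun vi => !PySem.List.pyGetD flags vi.2 false)
      = PySem.List.sorted2
        (((PySem.List.pyRange 0 (PySem.List.len cards)).filter
            (fun i => !PySem.Set.contains kA i)).map
          (fun i => (pvRankVal (PySem.List.pyGetD cards i []), i))) (·.1) (·.2) := by
    rw [pv_filter_sorted2, List.filter_map]
    have hfc : (PySem.List.pyRange 0 (PySem.List.len cards)).filter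
          ((fun vi => !PySem.List.pyGetD flags vi.2 false) ∘
            (fun i => (pvRankVal (PySem.List.pyGetD cards i []), i)))
        = (PySem.List.pyRange 0 (PySem.List.len cards)).filter
            (fun i => !PySem.Set.contains kA i) := by
      refine List.filter_congr ?_
      intro i hi
      show (!PySem.List.pyGetD flags i false) = (!PySem.Set.contains kA i)
      rw [← hc i hi]
    rw [hfc]
  rw [hdisc]
  by_cases hnil : PySem.List.sorted2
      (((PySem.List.pyRange 0 (PySem.List.len cards)).filter
          (fun i => !PySem.Set.contains kA i)).map
        (fun i => (pvRankVal (PySem.List.pyGetD cards i []), i))) (·.1) (·.2) = []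
  · rw [hnil]
    rw [if_pos (by simp), if_neg (by simp)]
    rw [pv_take5]
  · have hpos : (PySem.List.sorted2
        (((PySem.List.pyRange 0 (PySem.List.len cards)).filter
            (fun i => !PySem.Set.contains kA i)).map
          (fun i => (pvRankVal (PySem.List.pyGetD cards i []), i))) (·.1) (·.2)).length ≠ 0 := by
      simpa [List.length_eq_zero_iff] using hnil
    rw [if_neg (by omega), if_pos (by simpa using hnil)]
    rw [pv_take5, List.map_take]

-- ===== VERDICT (by name: the statement is the Claim_ definition above) =====
theorem get_discard_indices_spec : Claim_equal_get_discard_indices := by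
  intro cards _ _
  unfold Spec_get_discard_indices
  simp only [get_discard_indices, get_discard_indices_alt]
  rw [pv_kept0_eq cards, ← pv_len_keep12 cards]
  exact pv_tail cards _ _ (pv_keep_corr cards)
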